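-- pv_equiv track=rewrite | github.com/guilherme1628/my-plugins | contratos-sociais/skills/alteracao/scripts/find_company.py | pick_best_file
-- ===== SOURCE A (Python) =====
-- def pick_best_file(files: list) -> str:
--     """
--     From a list of (filepath, company_name, tipo, version) for the SAME company,
--     pick the best file: highest version Alteracao > Contrato Social.
--     """
--     alteracoes = [(fp, cn, t, v) for fp, cn, t, v in files if "altera" in t.lower()]
--     contratos = [(fp, cn, t, v) for fp, cn, t, v in files if "contrato" in t.lower() and "altera" not in t.lower()]
--
--     if alteracoes:
--         # Pick the one with the highest version number
--         best = max(alteracoes, key=lambda x: x[3])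
--         return best[0]
--     elif contratos:
--         return contratos[0][0]
--     else:
--         # Fallback: just return the first file
--         return files[0][0]
-- ===== SOURCE B (Python) =====
-- def pick_best_file(files: list) -> str:
--     """Decorate-and-max: rank every file with a tuple (priority, version) and take
--     one keyed max (max keeps the first of equal keys), instead of filtering into
--     type buckets and branching."""
--     def rank(f):
--         t = f[2].lower()
--         if "altera" in t:
--             return (2, f[3])
--         if "contrato" in t:
--             return (1, "")
--         return (0, "")
--     return max(files, key=rank)[0]
-- ===== Notes on version B (the rewrite author's own statement) =====
-- stated objective: alternative
-- what changed: Replaced A's two filter comprehensions plus a max scan and a branch chain with a single keyed max over the undivided list, ranking each file by a priority tuple (2/1/0 for alteracao/contrato/other, then version) and relying on max's first-of-equal-keys rule.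
import Mathlib
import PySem

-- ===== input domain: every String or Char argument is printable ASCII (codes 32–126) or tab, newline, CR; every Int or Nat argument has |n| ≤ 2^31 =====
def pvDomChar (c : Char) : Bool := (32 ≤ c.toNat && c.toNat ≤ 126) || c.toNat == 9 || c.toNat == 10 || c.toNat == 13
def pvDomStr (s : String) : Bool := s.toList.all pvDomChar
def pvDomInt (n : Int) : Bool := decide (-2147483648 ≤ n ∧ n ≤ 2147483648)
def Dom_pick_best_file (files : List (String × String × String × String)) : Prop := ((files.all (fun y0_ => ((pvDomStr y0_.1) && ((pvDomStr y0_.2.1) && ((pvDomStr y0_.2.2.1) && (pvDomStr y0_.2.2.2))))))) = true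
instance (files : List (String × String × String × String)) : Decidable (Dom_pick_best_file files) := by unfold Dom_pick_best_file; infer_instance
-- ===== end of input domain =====

-- B replaces A's two filter comprehensions + max scan + branch chain by ONE keyed
-- max over the whole list under a priority tuple (objective: alternative).
-- Both Pythons raise on the empty list (A IndexError, B ValueError); Pre_ excludes it.

-- ===== PORT A =====
def pvIsAlt (t : String) : Bool := PySem.Str.isIn "altera" (PySem.Str.lower t)
def pvIsCon (t : String) : Bool := PySem.Str.isIn "contrato" (PySem.Str.lower t)

def pick_best_file (files : List (String × String × String × String)) : String :=
  let alteracoes := files.filter (fun x => pvIsAlt x.2.2.1)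
  let contratos := files.filter (fun x => pvIsCon x.2.2.1 && !pvIsAlt x.2.2.1)
  if alteracoes ≠ [] then
    match PySem.List.max? alteracoes (fun x => x.2.2.2) with
    | some best => best.1
    | none => ""          -- unreachable: alteracoes ≠ []
  else if contratos ≠ [] then
    match contratos.head? with
    | some c => c.1
    | none => ""          -- unreachable: contratos ≠ []
  else
    match PySem.List.pyGet? files 0 with
    | some x => x.1
    | none => ""          -- IndexError on []; excluded by Pre_

-- ===== PORT B =====
-- rank(f) = (pvRank1 f, pvRank2 f); max(files, key=rank) is PySem.List.max2?
def pvRank1 (f : String × String × String × String) : Int :=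
  if pvIsAlt f.2.2.1 then 2 else if pvIsCon f.2.2.1 then 1 else 0
def pvRank2 (f : String × String × String × String) : String :=
  if pvIsAlt f.2.2.1 then f.2.2.2 else ""

def pick_best_file_alt (files : List (String × String × String × String)) : String :=
  match PySem.List.max2? files pvRank1 pvRank2 with
  | some m => m.1
  | none => ""            -- ValueError on []; excluded by Pre_

-- ===== PRECONDITION & SPEC =====
-- On [] A raises IndexError (files[0][0]) and B raises ValueError (max of empty).
def Pre_pick_best_file (files : List (String × String × String × String)) : Prop := files ≠ []
instance (files : List (String × String × String × String)) : Decidable (Pre_pick_best_file files) := by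
  unfold Pre_pick_best_file; infer_instance

def pvWitness_pick_best_file : (List (String × String × String × String)) :=
  [("a.pdf", "Acme", "Contrato Social", "1"), ("b.pdf", "Acme", "Alteracao", "2")]

def Spec_pick_best_file (files : List (String × String × String × String)) (out : String) : Prop := out = pick_best_file_alt files
instance (files : List (String × String × String × String)) (out : String) : Decidable (Spec_pick_best_file files out) := by unfold Spec_pick_best_file; infer_instance

-- ===== CLAIM (what is proved, stated in full; the proofs are below) =====
def Claim_equal_pick_best_file : Prop := ∀ (files : List (String × String × String × String)), Dom_pick_best_file files → Pre_pick_best_file files → Spec_pick_best_file files (pick_best_file files)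

-- ===== LEMMAS AND PROOFS =====

-- Abbreviation for the file-tuple type (proof-side only).
abbrev PvF : Type := String × String × String × String

-- Running max of versions (the value inside A's max? on a nonempty list).
def pvValMax (a : PvF) (t : List PvF) : PvF :=
  t.foldl (fun m x => if m.2.2.2 < x.2.2.2 then x else m) a

theorem pvValMax_cons (a x : PvF) (t : List PvF) :
    pvValMax a (x :: t) = pvValMax (if a.2.2.2 < x.2.2.2 then x else a) t := rfl

-- filter-cons helpers with the flags as plain hypotheses
theorem pvFA_pos {m : PvF} (l : List PvF) (h : pvIsAlt m.2.2.1 = true) :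
    (m :: l).filter (fun x => pvIsAlt x.2.2.1) = m :: l.filter (fun x => pvIsAlt x.2.2.1) := by
  simp [List.filter_cons, h]

theorem pvFA_neg {m : PvF} (l : List PvF) (h : pvIsAlt m.2.2.1 = false) :
    (m :: l).filter (fun x => pvIsAlt x.2.2.1) = l.filter (fun x => pvIsAlt x.2.2.1) := by
  simp [List.filter_cons, h]

theorem pvFC_pos {m : PvF} (l : List PvF) (h1 : pvIsAlt m.2.2.1 = false)
    (h2 : pvIsCon m.2.2.1 = true) :
    (m :: l).filter (fun x => pvIsCon x.2.2.1 && !pvIsAlt x.2.2.1)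
      = m :: l.filter (fun x => pvIsCon x.2.2.1 && !pvIsAlt x.2.2.1) := by
  simp [List.filter_cons, h1, h2]

theorem pvFC_neg {m : PvF} (l : List PvF) (h : pvIsCon m.2.2.1 = false) :
    (m :: l).filter (fun x => pvIsCon x.2.2.1 && !pvIsAlt x.2.2.1)
      = l.filter (fun x => pvIsCon x.2.2.1 && !pvIsAlt x.2.2.1) := by
  simp [List.filter_cons, h]

-- Bool negation helper: turn ¬ b = true into b = false cheaply.
theorem pvBF {b : Bool} (h : ¬ b = true) : b = false := by
  cases b with
  | false => rfl
  | true => exact absurd rfl h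

-- What B's keyed max computes on m :: l, phrased in A's terms.
def pvG (m : PvF) (l : List PvF) : PvF :=
  match (m :: l).filter (fun x => pvIsAlt x.2.2.1) with
  | a :: t => pvValMax a t
  | [] =>
    match (m :: l).filter (fun x => pvIsCon x.2.2.1 && !pvIsAlt x.2.2.1) with
    | c :: _ => c
    | [] => m

theorem pvG_alt {m : PvF} (l : List PvF) (h : pvIsAlt m.2.2.1 = true) :
    pvG m l = pvValMax m (l.filter (fun x => pvIsAlt x.2.2.1)) := by
  unfold pvG
  rw [pvFA_pos l h]

theorem pvG_con {m : PvF} (l : List PvF) (h1 : pvIsAlt m.2.2.1 = false)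
    (h2 : pvIsCon m.2.2.1 = true) :
    pvG m l = match l.filter (fun x => pvIsAlt x.2.2.1) with
      | a :: t => pvValMax a t
      | [] => m := by
  unfold pvG
  rw [pvFA_neg l h1, pvFC_pos l h1 h2]

theorem pvG_other {m : PvF} (l : List PvF) (h1 : pvIsAlt m.2.2.1 = false)
    (h2 : pvIsCon m.2.2.1 = false) :
    pvG m l = match l.filter (fun x => pvIsAlt x.2.2.1) with
      | a :: t => pvValMax a t
      | [] =>
        match l.filter (fun x => pvIsCon x.2.2.1 && !pvIsAlt x.2.2.1) with
        | c :: _ => c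
        | [] => m := by
  unfold pvG
  rw [pvFA_neg l h1, pvFC_neg l h2]

theorem pvMax?_cons (t : List PvF) (a : PvF) :
    PySem.List.max? (a :: t) (fun x => x.2.2.2) = some (pvValMax a t) := by
  induction t generalizing a with
  | nil => rfl
  | cons x xs ih =>
    by_cases h : a.2.2.2 < x.2.2.2
    · have h1 : PySem.List.max? (a :: x :: xs) (fun y => y.2.2.2)
          = PySem.List.max? (x :: xs) (fun y => y.2.2.2) := by
        unfold PySem.List.max?
        simp only [List.foldl_cons]
        rw [if_pos h]
      rw [h1, ih, pvValMax_cons, if_pos h]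
    · have h1 : PySem.List.max? (a :: x :: xs) (fun y => y.2.2.2)
          = PySem.List.max? (a :: xs) (fun y => y.2.2.2) := by
        unfold PySem.List.max?
        simp only [List.foldl_cons]
        rw [if_neg h]
      rw [h1, ih, pvValMax_cons, if_neg h]

set_option maxHeartbeats 1000000 in
theorem pvMax2?_eq (l : List PvF) (m : PvF) :
    PySem.List.max2? (m :: l) pvRank1 pvRank2 = some (pvG m l) := by
  induction l generalizing m with
  | nil =>
    by_cases ha : pvIsAlt m.2.2.1
    · rw [pvG_alt [] ha]; rfl
    · by_cases hc : pvIsCon m.2.2.1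
      · rw [pvG_con [] (pvBF ha) hc]; rfl
      · rw [pvG_other [] (pvBF ha) (pvBF hc)]; rfl
  | cons x t ih =>
    by_cases hC : (decide (pvRank1 m < pvRank1 x) || !decide (pvRank1 x < pvRank1 m) && decide (pvRank2 m < pvRank2 x)) = true
    · -- x takes the lead
      have h1 : PySem.List.max2? (m :: x :: t) pvRank1 pvRank2
          = PySem.List.max2? (x :: t) pvRank1 pvRank2 := by
        unfold PySem.List.max2?
        simp only [List.foldl_cons]
        rw [if_pos hC]
      rw [h1, ih x]
      apply congrArg
      -- pvG x t = pvG m (x :: t), given that x wins the rank comparison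
      by_cases ham : pvIsAlt m.2.2.1 <;> by_cases hax : pvIsAlt x.2.2.1
      · -- both alteracao: winning means ver m < ver x
        have hv : m.2.2.2 < x.2.2.2 := by
          unfold pvRank1 pvRank2 at hC
          simp only [ham, hax, if_true, lt_self_iff_false, decide_false,
            Bool.false_or, Bool.not_false, Bool.true_and] at hC
          exact of_decide_eq_true hC
        rw [pvG_alt t hax, pvG_alt (x :: t) ham, pvFA_pos t hax,
          pvValMax_cons, if_pos hv]
      · -- m alteracao, x not: x cannot win
        exfalso
        unfold pvRank1 pvRank2 at hC
        by_cases hcx : pvIsCon x.2.2.1 <;> simp [ham, hax, hcx] at hC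
      · -- x alteracao, m not: x heads the alt filter on both sides
        rw [pvG_alt t hax]
        by_cases hcm : pvIsCon m.2.2.1
        · rw [pvG_con (x :: t) (pvBF ham) hcm, pvFA_pos t hax]
        · rw [pvG_other (x :: t) (pvBF ham) (pvBF hcm), pvFA_pos t hax]
      · -- neither alteracao: winning forces m not contrato, x contrato
        by_cases hcm : pvIsCon m.2.2.1
        · exfalso
          unfold pvRank1 pvRank2 at hC
          by_cases hcx : pvIsCon x.2.2.1 <;> simp [ham, hax, hcm, hcx] at hC
        · by_cases hcx : pvIsCon x.2.2.1
          · rw [pvG_con t (pvBF hax) hcx,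
              pvG_other (x :: t) (pvBF ham) (pvBF hcm),
              pvFA_neg t (pvBF hax), pvFC_pos t (pvBF hax) hcx]
          · exfalso
            unfold pvRank1 pvRank2 at hC
            simp [ham, hax, hcm, hcx] at hC
    · -- m keeps the lead
      have h1 : PySem.List.max2? (m :: x :: t) pvRank1 pvRank2
          = PySem.List.max2? (m :: t) pvRank1 pvRank2 := by
        unfold PySem.List.max2?
        simp only [List.foldl_cons]
        rw [if_neg hC]
      rw [h1, ih m]
      apply congrArg
      -- pvG m t = pvG m (x :: t), given that x does not win
      by_cases ham : pvIsAlt m.2.2.1 <;> by_cases hax : pvIsAlt x.2.2.1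
      · -- both alteracao: not winning means ¬(ver m < ver x)
        have hv : ¬ m.2.2.2 < x.2.2.2 := by
          intro hv
          apply hC
          unfold pvRank1 pvRank2
          simp [ham, hax, hv]
        rw [pvG_alt t ham, pvG_alt (x :: t) ham, pvFA_pos t hax,
          pvValMax_cons, if_neg hv]
      · -- m alteracao, x not: x drops out of the alt filter
        rw [pvG_alt t ham, pvG_alt (x :: t) ham, pvFA_neg t (pvBF hax)]
      · -- x alteracao, m not: x would have won
        exfalso
        apply hC
        unfold pvRank1 pvRank2
        by_cases hcm : pvIsCon m.2.2.1 <;> simp [ham, hax, hcm]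
      · -- neither alteracao: not winning means m contrato or x not contrato
        by_cases hcm : pvIsCon m.2.2.1
        · rw [pvG_con t (pvBF ham) hcm, pvG_con (x :: t) (pvBF ham) hcm,
            pvFA_neg t (pvBF hax)]
        · by_cases hcx : pvIsCon x.2.2.1
          · exfalso
            apply hC
            unfold pvRank1 pvRank2
            simp [ham, hax, hcm, hcx]
          · rw [pvG_other t (pvBF ham) (pvBF hcm),
              pvG_other (x :: t) (pvBF ham) (pvBF hcm),
              pvFA_neg t (pvBF hax), pvFC_neg t (pvBF hcx)]

-- ===== VERDICT (by name: the statement is the Claim_ definition above) =====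
theorem pick_best_file_spec : Claim_equal_pick_best_file := by
  intro files _ hpre
  unfold Spec_pick_best_file
  obtain ⟨m, l, rfl⟩ := List.exists_cons_of_ne_nil hpre
  unfold pick_best_file pick_best_file_alt
  rw [pvMax2?_eq]
  unfold pvG
  cases halt : (m :: l).filter (fun x => pvIsAlt x.2.2.1) with
  | cons a t =>
    dsimp only
    rw [if_pos (List.cons_ne_nil a t), pvMax?_cons]
  | nil =>
    dsimp only
    rw [if_neg (fun h => h rfl)]
    cases hcon : (m :: l).filter (fun x => pvIsCon x.2.2.1 && !pvIsAlt x.2.2.1) with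
    | cons c cs => rw [if_pos (List.cons_ne_nil c cs)]; rfl
    | nil =>
      rw [if_neg (fun h => h rfl)]
      have hg : PySem.List.pyGet? (m :: l) 0 = some m := by
        simp [PySem.List.pyGet?, PySem.List.pyIdx?]
      rw [hg]
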